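-- pv_equiv track=rewrite | github.com/truongdo619/I645 | utils/evaluate_EM_metric_newline.py | convert_full_form_to_decoupled_form
-- ===== SOURCE A (Python) =====
-- OPEN_BRACKET = "["
--
-- CLOSE_BRACKET = "]"
--
-- def convert_full_form_to_decoupled_form(full_form):
--     tokens = full_form.split(" ")
--     unexpected_token_num_check = 1
--     cur_num_check = 0
--     result = []
--     for token in tokens:
--         if token.startswith(OPEN_BRACKET) or token.startswith(CLOSE_BRACKET) or cur_num_check != unexpected_token_num_check:
--             result.append(token)
--         if token.startswith(OPEN_BRACKET):
--             cur_num_check += 1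
--         if token.startswith(CLOSE_BRACKET):
--             cur_num_check -= 1
--     return " ".join(result)
-- ===== SOURCE B (Python) =====
-- def convert_full_form_to_decoupled_form(full_form):
--     tokens = full_form.split(" ")
--     # Pass 1: total bracket delta over the whole string.
--     depth = sum(1 if t.startswith("[") else -1 if t.startswith("]") else 0
--                 for t in tokens)
--     # Pass 2: walk the tokens RIGHT-TO-LEFT; undoing each token's delta turns
--     # `depth` into the nesting level just before that token, so the same keep
--     # test applies while the output is assembled back-to-front.
--     kept_rev = []
--     for t in reversed(tokens):
--         if t.startswith("["):
--             depth -= 1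
--         elif t.startswith("]"):
--             depth += 1
--         if t.startswith("[") or t.startswith("]") or depth != 1:
--             kept_rev.append(t)
--     kept_rev.reverse()
--     return " ".join(kept_rev)
-- ===== Notes on version B (the rewrite author's own statement) =====
-- stated objective: alternative
-- what changed: Replaces A's single forward pass with a running counter by a two-pass scheme: first the total bracket delta of the whole string, then a right-to-left traversal that recovers the depth before each token by undoing its delta and builds the kept list back-to-front, reversing it once at the end.
import Mathlib
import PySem

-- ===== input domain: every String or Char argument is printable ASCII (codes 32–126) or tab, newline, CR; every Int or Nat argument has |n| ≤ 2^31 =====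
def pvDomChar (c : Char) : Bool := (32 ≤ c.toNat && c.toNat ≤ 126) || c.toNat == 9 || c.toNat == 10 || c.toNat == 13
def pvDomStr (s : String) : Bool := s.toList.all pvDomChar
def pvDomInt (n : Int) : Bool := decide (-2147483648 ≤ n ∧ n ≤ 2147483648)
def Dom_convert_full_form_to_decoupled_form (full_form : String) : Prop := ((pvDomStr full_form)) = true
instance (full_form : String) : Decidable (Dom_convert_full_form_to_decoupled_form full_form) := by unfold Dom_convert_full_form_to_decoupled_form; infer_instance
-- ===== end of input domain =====

-- B replaces A's single forward pass with a total-delta pass plus a right-to-left pass that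
-- rebuilds the depth before each token and assembles the output back-to-front (objective: alternative, same cost).

-- ===== PORT A =====
def convert_full_form_to_decoupled_form (full_form : String) : String :=
  let tokens := (PySem.Str.split? full_form " ").getD []
  let st := tokens.foldl (fun (acc : Int × List String) token =>
    let result := if PySem.Str.startswith token "[" || PySem.Str.startswith token "]"
                     || acc.1 ≠ 1 then acc.2 ++ [token] else acc.2
    let cur := if PySem.Str.startswith token "[" then acc.1 + 1 else acc.1
    let cur := if PySem.Str.startswith token "]" then cur - 1 else cur
    (cur, result)) ((0 : Int), ([] : List String))
  PySem.Str.join " " st.2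

-- ===== PORT B =====
def convert_full_form_to_decoupled_form_alt (full_form : String) : String :=
  let tokens := (PySem.Str.split? full_form " ").getD []
  -- pass 1: sum of the per-token deltas
  let depth0 := tokens.foldl (fun (s : Int) t =>
    s + (if PySem.Str.startswith t "[" then 1
         else if PySem.Str.startswith t "]" then -1 else 0)) 0
  -- pass 2: right-to-left, undoing each delta and appending kept tokens in reverse
  let st := tokens.reverse.foldl (fun (acc : Int × List String) t =>
    let d := if PySem.Str.startswith t "[" then acc.1 - 1
             else if PySem.Str.startswith t "]" then acc.1 + 1 else acc.1
    let kept := if PySem.Str.startswith t "[" || PySem.Str.startswith t "]" || d ≠ 1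
                then acc.2 ++ [t] else acc.2
    (d, kept)) (depth0, ([] : List String))
  PySem.Str.join " " st.2.reverse

-- ===== PRECONDITION & SPEC =====
def Spec_convert_full_form_to_decoupled_form (full_form : String) (out : String) : Prop := out = convert_full_form_to_decoupled_form_alt full_form
instance (full_form : String) (out : String) : Decidable (Spec_convert_full_form_to_decoupled_form full_form out) := by unfold Spec_convert_full_form_to_decoupled_form; infer_instance

-- ===== CLAIM (what is proved, stated in full; the proofs are below) =====
def Claim_equal_convert_full_form_to_decoupled_form : Prop := ∀ (full_form : String), Dom_convert_full_form_to_decoupled_form full_form → Spec_convert_full_form_to_decoupled_form full_form (convert_full_form_to_decoupled_form full_form)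

-- ===== LEMMAS AND PROOFS =====

def pvDelta (t : String) : Int :=
  if PySem.Str.startswith t "[" then 1 else if PySem.Str.startswith t "]" then -1 else 0

-- the kept tokens, as a recursion in the running depth (shared characterisation of both ports)
def pvKept (cur : Int) : List String → List String
  | [] => []
  | t :: ts =>
      (if PySem.Str.startswith t "[" || PySem.Str.startswith t "]" || cur ≠ 1
       then [t] else []) ++ pvKept (cur + pvDelta t) ts

def pvSum : List String → Int
  | [] => 0
  | t :: ts => pvDelta t + pvSum ts

theorem pv_not_both (t : String) :
    ¬(PySem.Str.startswith t "[" = true ∧ PySem.Str.startswith t "]" = true) := by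
  rintro ⟨h1, h2⟩
  simp only [PySem.Str.startswith_eq, PySem.Chars.startswith_iff] at h1 h2
  rw [show "[".toList = ['['] from rfl] at h1
  rw [show "]".toList = [']'] from rfl] at h2
  generalize t.toList = l at h1 h2
  cases l with
  | nil => simp at h1
  | cons c cs =>
      rw [List.cons_prefix_cons] at h1 h2
      exact absurd (h1.1.trans h2.1.symm) (by decide)

theorem pvStep (b1 b2 : Bool) (hb : ¬(b1 = true ∧ b2 = true)) (cur : Int) :
    (if b2 then (if b1 then cur + 1 else cur) - 1 else (if b1 then cur + 1 else cur))
      = cur + (if b1 then 1 else if b2 then -1 else 0) := by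
  cases b1 <;> cases b2 <;> simp_all <;> omega

theorem pvA_loop (ts : List String) (cur : Int) (res : List String) :
    (ts.foldl (fun (acc : Int × List String) token =>
      let result := if PySem.Str.startswith token "[" || PySem.Str.startswith token "]"
                       || acc.1 ≠ 1 then acc.2 ++ [token] else acc.2
      let cur := if PySem.Str.startswith token "[" then acc.1 + 1 else acc.1
      let cur := if PySem.Str.startswith token "]" then cur - 1 else cur
      (cur, result)) (cur, res)).2 = res ++ pvKept cur ts := by
  induction ts generalizing cur res with
  | nil => simp [pvKept]
  | cons t ts ih =>
      simp only [List.foldl_cons, pvKept]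
      rw [ih]
      have hdelta := pvStep (PySem.Str.startswith t "[") (PySem.Str.startswith t "]")
        (pv_not_both t) cur
      rw [show pvDelta t = (if PySem.Str.startswith t "[" then (1 : Int)
            else if PySem.Str.startswith t "]" then -1 else 0) from rfl, hdelta]
      split <;> simp

theorem pvSum_foldl (ts : List String) (c : Int) :
    (ts.foldl (fun (s : Int) t =>
      s + (if PySem.Str.startswith t "[" then 1
           else if PySem.Str.startswith t "]" then -1 else 0)) c) = c + pvSum ts := by
  induction ts generalizing c with
  | nil => simp [pvSum]
  | cons t ts ih =>
      simp only [List.foldl_cons, pvSum, ih]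
      rw [show (if PySem.Str.startswith t "[" then (1:Int)
            else if PySem.Str.startswith t "]" then -1 else 0) = pvDelta t from rfl]
      ring

theorem pvUndo (t : String) (cur : Int) :
    (if PySem.Str.startswith t "[" then cur + pvDelta t - 1
     else if PySem.Str.startswith t "]" then cur + pvDelta t + 1 else cur + pvDelta t) = cur := by
  have := pv_not_both t
  unfold pvDelta
  cases h1 : PySem.Str.startswith t "[" <;> cases h2 : PySem.Str.startswith t "]" <;>
    simp_all <;> omega

theorem pvB_loop (ts : List String) (cur : Int) (acc : List String) :
    (ts.reverse.foldl (fun (acc : Int × List String) t =>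
      let d := if PySem.Str.startswith t "[" then acc.1 - 1
               else if PySem.Str.startswith t "]" then acc.1 + 1 else acc.1
      let kept := if PySem.Str.startswith t "[" || PySem.Str.startswith t "]" || d ≠ 1
                  then acc.2 ++ [t] else acc.2
      (d, kept)) (cur + pvSum ts, acc))
    = (cur, acc ++ (pvKept cur ts).reverse) := by
  induction ts generalizing cur acc with
  | nil => simp [pvKept, pvSum]
  | cons t ts ih =>
      rw [List.reverse_cons, List.foldl_append]
      rw [show cur + pvSum (t :: ts) = (cur + pvDelta t) + pvSum ts by
        simp [pvSum]; ring]
      rw [ih]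
      simp only [List.foldl_cons, List.foldl_nil, pvKept]
      rw [show (if PySem.Str.startswith t "[" then cur + pvDelta t - 1
            else if PySem.Str.startswith t "]" then cur + pvDelta t + 1
            else cur + pvDelta t) = cur from pvUndo t cur]
      split <;> simp

-- ===== VERDICT (by name: the statement is the Claim_ definition above) =====
theorem convert_full_form_to_decoupled_form_spec : Claim_equal_convert_full_form_to_decoupled_form := by
  intro full_form _
  unfold Spec_convert_full_form_to_decoupled_form
  unfold convert_full_form_to_decoupled_form convert_full_form_to_decoupled_form_alt
  simp only [pvA_loop, pvSum_foldl, List.nil_append]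
  rw [pvB_loop]
  simp
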